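-- pv_equiv track=rewrite | github.com/J-millar99/algorithm | Programmers/Lv0/A강조하기.py | solution
-- ===== SOURCE A (Python) =====
-- def solution(myString):
--     answer = ""
--     for ch in myString:
--         if 'B' <= ch <= 'Z':
--             ch = chr(ord(ch) + (ord('a') - ord('A')))
--         elif (ch == 'a'):
--             ch = chr(ord(ch) - (ord('a') - ord('A')))
--         answer += ch
--     return answer
-- ===== SOURCE B (Python) =====
-- def solution(myString):
--     parts = myString.split('a')
--     lowered = [''.join(chr(ord(c) + 32) if 'B' <= c <= 'Z' else c for c in p)
--                for p in parts]
--     return 'A'.join(lowered)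
-- ===== Notes on version B (the rewrite author's own statement) =====
-- stated objective: alternative
-- what changed: Instead of one accumulating loop branching per character, B stages the work: it splits the string on 'a', lowercases only the 'B'..'Z' letters inside each 'a'-free segment, and rejoins the segments with 'A', so the 'a'-handling branch disappears into the split/join structure.
import Mathlib
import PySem

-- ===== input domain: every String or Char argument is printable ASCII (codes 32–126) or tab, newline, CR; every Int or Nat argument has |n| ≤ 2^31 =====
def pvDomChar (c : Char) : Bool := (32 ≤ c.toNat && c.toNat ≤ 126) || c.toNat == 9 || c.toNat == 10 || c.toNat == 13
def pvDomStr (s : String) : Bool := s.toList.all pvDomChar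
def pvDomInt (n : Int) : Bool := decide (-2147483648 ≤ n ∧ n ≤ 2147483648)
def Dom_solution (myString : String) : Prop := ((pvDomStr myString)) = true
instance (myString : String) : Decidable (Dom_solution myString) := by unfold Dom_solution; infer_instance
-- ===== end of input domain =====

-- B replaces A's single accumulating loop (per-character branching) by staged passes:
-- split on 'a', lowercase 'B'..'Z' inside each 'a'-free segment, rejoin with 'A' (alternative decomposition, same cost).

-- ===== PORT A =====
-- per-character branch of A's loop body
def solutionStep (ch : Char) : Char :=
  if 'B' ≤ ch ∧ ch ≤ 'Z' then Char.ofNat (ch.toNat + ('a'.toNat - 'A'.toNat))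
  else if ch = 'a' then Char.ofNat (ch.toNat - ('a'.toNat - 'A'.toNat))
  else ch

def solution (myString : String) : String :=
  String.ofList (myString.toList.foldl (fun acc ch => acc ++ [solutionStep ch]) [])

-- ===== PORT B =====
-- ''.join(chr(ord(c) + 32) if 'B' <= c <= 'Z' else c for c in p)
def solutionLowerSeg (p : List Char) : List Char :=
  p.map (fun c => if 'B' ≤ c ∧ c ≤ 'Z' then Char.ofNat (c.toNat + 32) else c)

def solution_alt (myString : String) : String :=
  -- parts = myString.split('a'); return 'A'.join(lowered segments)
  String.ofList
    (PySem.Chars.join ['A'] ((PySem.Chars.splitOn myString.toList ['a']).map solutionLowerSeg))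

-- ===== PRECONDITION & SPEC =====
def Spec_solution (myString : String) (out : String) : Prop := out = solution_alt myString
instance (myString : String) (out : String) : Decidable (Spec_solution myString out) := by unfold Spec_solution; infer_instance

-- ===== CLAIM (what is proved, stated in full; the proofs are below) =====
def Claim_equal_solution : Prop := ∀ (myString : String), Dom_solution myString → Spec_solution myString (solution myString)

-- ===== LEMMAS AND PROOFS =====

-- simple structural model of splitting on 'a': (first segment, remaining segments)
theorem intercalate_cons₂ (x y : List Char) (zs : List (List Char)) :
    List.intercalate ['A'] (x :: y :: zs) = x ++ 'A' :: List.intercalate ['A'] (y :: zs) := by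
  simp [List.intercalate, List.intersperse]

def splitAModel : List Char → List Char × List (List Char)
  | [] => ([], [])
  | c :: t =>
    let r := splitAModel t
    if c = 'a' then ([], r.1 :: r.2) else (c :: r.1, r.2)

theorem splitOn_go_eq (l : List Char) : ∀ (fuel : Nat), l.length ≤ fuel →
    ∀ (cur : List Char) (acc : List (List Char)),
    PySem.Chars.splitOn.go ['a'] fuel l cur acc
      = acc.reverse ++ (cur.reverse ++ (splitAModel l).1) :: (splitAModel l).2 := by
  induction l with
  | nil =>
    intro fuel _ cur acc
    cases fuel <;> simp [PySem.Chars.splitOn.go, splitAModel]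
  | cons c t ih =>
    intro fuel hf cur acc
    cases fuel with
    | zero => simp at hf
    | succ f =>
      have hf' : t.length ≤ f := by simpa using hf
      by_cases hc : c = 'a'
      · subst hc
        rw [PySem.Chars.splitOn.go]
        simp only [List.isPrefixOf, beq_self_eq_true, Bool.true_and, if_pos, List.length_cons,
          List.length_nil, List.drop_succ_cons, List.drop_zero]
        rw [ih f hf' [] (cur.reverse :: acc)]
        simp [splitAModel]
      · rw [PySem.Chars.splitOn.go]
        rw [show List.isPrefixOf ['a'] (c :: t) = false by
          simp [List.isPrefixOf]; exact fun h => hc h.symm]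
        simp only [Bool.false_eq_true, if_false]
        rw [ih f hf' (c :: cur) acc]
        simp [splitAModel, hc]

theorem splitOn_eq (l : List Char) :
    PySem.Chars.splitOn l ['a'] = (splitAModel l).1 :: (splitAModel l).2 := by
  rw [PySem.Chars.splitOn, splitOn_go_eq l (l.length + 1) (by omega) [] []]
  simp

theorem intercalate_join (l : List Char) :
    List.intercalate ['A']
        (((splitAModel l).1 :: (splitAModel l).2).map solutionLowerSeg)
      = l.map solutionStep := by
  induction l with
  | nil => simp [splitAModel, solutionLowerSeg, List.intercalate]
  | cons c t ih =>
    by_cases hc : c = 'a'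
    · subst hc
      simp only [splitAModel, if_true]
      rw [List.map_cons, List.map_cons, intercalate_cons₂]
      rw [List.map_cons] at ih
      rw [ih]
      simp [solutionLowerSeg, solutionStep]
    · simp only [splitAModel, if_neg hc]
      have : solutionLowerSeg (c :: (splitAModel t).1)
          = solutionStep c :: solutionLowerSeg (splitAModel t).1 := by
        simp only [solutionLowerSeg, List.map_cons, solutionStep]
        by_cases hbz : 'B' ≤ c ∧ c ≤ 'Z'
        · simp [hbz]
        · simp [hbz, hc]
      rw [List.map_cons] at ih ⊢
      cases h2 : ((splitAModel t).2).map solutionLowerSeg with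
      | nil =>
        rw [h2] at ih
        simp only [this, List.intercalate, List.intersperse] at ih ⊢
        simpa using ih
      | cons y ys =>
        rw [h2] at ih
        rw [intercalate_cons₂] at ih ⊢
        rw [this, List.map_cons]
        simpa using ih

-- ===== VERDICT (by name: the statement is the Claim_ definition above) =====
theorem solution_spec : Claim_equal_solution := by
  intro s _
  unfold Spec_solution solution solution_alt
  rw [PySem.List.foldl_append_singleton_eq_map]
  rw [splitOn_eq]
  congr 1
  rw [show PySem.Chars.join = fun sep parts => List.intercalate sep parts from rfl]
  simp only [List.nil_append]
  exact (intercalate_join s.toList).symm
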